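-- pv_equiv track=rewrite | github.com/alexandraback/datacollection | solutions_5634697451274240_1/Python/ChrisViking/prob_b.py | compute_steps
-- ===== SOURCE A (Python) =====
-- def compute_steps(s):
--
--     s = s.rstrip('+')
--     if not s:
--         return 0
--     step = 1
--     current = s[0]
--     for c in s[1:]:
--         if c != current:
--             step += 1
--             current = c
--
--     return step
-- ===== SOURCE B (Python) =====
-- def compute_steps(s):
--     t = s.rstrip('+')
--     steps = 0
--     while t:
--         t = t.lstrip(t[0])   # remove the entire leading run in one step
--         steps += 1
--     return steps
-- ===== Notes on version B (the rewrite author's own statement) =====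
-- stated objective: alternative
-- what changed: Replaces A's single pass comparing each character with the previous one by a run-peeling loop: repeatedly strip the whole leading run with str.lstrip(t[0]) and count how many strips empty the string; no adjacent-pair comparison or current-char state is kept; trades the per-run string copy for shorter, state-free code.
import Mathlib
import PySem

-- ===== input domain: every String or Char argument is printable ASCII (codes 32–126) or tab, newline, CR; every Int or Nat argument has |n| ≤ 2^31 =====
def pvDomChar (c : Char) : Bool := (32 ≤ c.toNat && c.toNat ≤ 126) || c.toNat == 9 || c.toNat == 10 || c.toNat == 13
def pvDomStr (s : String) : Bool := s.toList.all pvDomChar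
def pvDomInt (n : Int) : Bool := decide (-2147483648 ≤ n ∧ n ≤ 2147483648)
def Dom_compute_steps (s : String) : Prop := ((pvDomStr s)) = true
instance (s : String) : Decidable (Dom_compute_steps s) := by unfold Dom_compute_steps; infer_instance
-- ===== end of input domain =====

-- B replaces A's per-character pass (tracking the current char) by a run-peeling loop:
-- strip the whole leading run each iteration and count the iterations (objective: alternative).

-- s.rstrip('+') on the character list (exact: drops exactly the trailing '+' characters)
def pvRstripPlus (cs : List Char) : List Char := (cs.reverse.dropWhile (· == '+')).reverse

-- ===== PORT A =====
def compute_steps (s : String) : Int :=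
  let t := pvRstripPlus s.toList
  match t with
  | [] => 0                                    -- if not s: return 0
  | c0 :: rest =>                              -- step = 1; current = s[0]; for c in s[1:]: …
    (rest.foldl (fun (st : Int × Char) c =>
      if c ≠ st.2 then (st.1 + 1, c) else st) (1, c0)).1

-- ===== PORT B =====
-- Source B's while loop: each iteration removes the leading run (t.lstrip(t[0]) =
-- dropWhile (== head)) and increments the counter.
def pvPeelRuns : List Char → Int → Int
  | [], steps => steps
  | c :: rest, steps => pvPeelRuns (rest.dropWhile (· == c)) (steps + 1)
termination_by t _ => t.length
decreasing_by
  simpa using Nat.lt_succ_of_le (List.length_dropWhile_le _ _)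

def compute_steps_alt (s : String) : Int :=
  pvPeelRuns (pvRstripPlus s.toList) 0

-- ===== PRECONDITION & SPEC =====
def Spec_compute_steps (s : String) (out : Int) : Prop := out = compute_steps_alt s
instance (s : String) (out : Int) : Decidable (Spec_compute_steps s out) := by unfold Spec_compute_steps; infer_instance

-- ===== CLAIM =====
def Claim_equal_compute_steps : Prop := ∀ (s : String), Dom_compute_steps s → Spec_compute_steps s (compute_steps s)

-- ===== LEMMAS AND PROOFS =====

-- A's fold from state (k, c) over l equals B's run-peeling on l after the current run
-- (chars equal to c) is consumed, continuing the count at k.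
theorem pv_fold_eq_peel (l : List Char) : ∀ (k : Int) (c : Char),
    (l.foldl (fun (st : Int × Char) c => if c ≠ st.2 then (st.1 + 1, c) else st) (k, c)).1
      = pvPeelRuns (l.dropWhile (· == c)) k := by
  induction l with
  | nil => intro k c; simp [pvPeelRuns]
  | cons d l ih =>
    intro k c
    by_cases h : d = c
    · subst h
      simp only [List.foldl_cons, ne_eq, not_true_eq_false, if_false,
        List.dropWhile_cons, BEq.rfl, if_pos]
      exact ih k d
    · simp only [List.foldl_cons, if_pos (by simpa using h)]
      rw [ih (k + 1) d]
      conv_rhs => rw [pvPeelRuns.eq_def]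
      simp [h]

-- ===== VERDICT =====
theorem compute_steps_spec : Claim_equal_compute_steps := by
  intro s _
  unfold Spec_compute_steps compute_steps compute_steps_alt
  cases h : pvRstripPlus s.toList with
  | nil => simp [pvPeelRuns]
  | cons c0 rest =>
    simp only
    rw [pv_fold_eq_peel rest 1 c0]
    conv_rhs => rw [pvPeelRuns.eq_def]
    norm_num
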